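-- pv_equiv track=rewrite | github.com/vinpap/miscellaneous | KryptX/src/vigenerecipher_algo.py | prepareKey
-- ===== SOURCE A (Python) =====
-- def prepareKey(key, messageLength):
--
--     if len(key) == messageLength:
--
--         return key
--
--     elif len(key) > messageLength:
--
--         while len(key) != messageLength:
--
--             key = key[:-1]
--
--         return key
--
--
--
--     originalKey = key
--
--     while len(key) != messageLength:
--
--         for i in originalKey:
--
--             key = key + i
--
--             if len(key) == messageLength:
--
--                 break
--     return key
-- ===== SOURCE B (Python) =====
-- def prepareKey(key, messageLength):
--     return ''.join(key[i % len(key)] for i in range(messageLength))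
-- ===== Notes on version B (the rewrite author's own statement) =====
-- stated objective: simpler
-- what changed: Replaces the three-way length case split with while-loops (character-by-character truncation, nested repeat-and-break extension) by a single index-driven comprehension key[i % len(key)] over range(messageLength).
import Mathlib
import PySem

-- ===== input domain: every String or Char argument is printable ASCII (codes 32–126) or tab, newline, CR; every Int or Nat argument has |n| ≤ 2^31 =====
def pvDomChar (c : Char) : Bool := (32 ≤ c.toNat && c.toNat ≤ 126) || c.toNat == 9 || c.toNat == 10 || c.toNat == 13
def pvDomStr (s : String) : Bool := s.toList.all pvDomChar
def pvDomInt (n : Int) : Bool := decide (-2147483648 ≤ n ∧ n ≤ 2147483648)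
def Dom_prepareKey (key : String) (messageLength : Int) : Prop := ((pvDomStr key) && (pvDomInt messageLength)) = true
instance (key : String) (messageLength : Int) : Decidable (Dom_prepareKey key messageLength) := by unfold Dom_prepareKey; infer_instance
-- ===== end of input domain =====

-- B replaces A's three-way case split with while-loops by one index-driven
-- comprehension key[i % len(key)] over range(messageLength) (objective: simpler).

-- ===== PORT A =====
-- 'while len(key) != messageLength: key = key[:-1]'.  The extra 'l ≠ []' is a
-- totality guard only: inside Pre_ this loop only runs with 0 ≤ m < l.length.
def pvTrunc (l : List Char) (m : Int) : List Char :=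
  if h : (l.length : Int) ≠ m ∧ l ≠ [] then
    pvTrunc (PySem.List.slice l none (some (-1))) m
  else l
termination_by l.length
decreasing_by
  simp only [Int.reduceNeg, PySem.List.slice_to_neg_one, List.length_dropLast]
  have := List.length_pos_iff.mpr h.2
  omega

-- the inner 'for i in originalKey: key = key + i; if len(key) == messageLength: break'.
-- The growing key is kept as a REVERSED accumulator 'rkey' with its length 'klen'
-- carried alongside (Python's len is O(1)); same iteration structure, linear evaluation.
def pvFor : List Char → List Char → Nat → Int → List Char × Nat
  | [], rkey, klen, _ => (rkey, klen)
  | c :: cs, rkey, klen, m =>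
    if (((klen + 1 : Nat) : Int) = m) then (c :: rkey, klen + 1)
    else pvFor cs (c :: rkey) (klen + 1) m

-- used by pvExt's decreasing_by: the for-body strictly grows the key
theorem pvFor_snd_ge (cs : List Char) (rkey : List Char) (klen : Nat) (m : Int) :
    klen ≤ (pvFor cs rkey klen m).2 := by
  induction cs generalizing rkey klen with
  | nil => simp [pvFor]
  | cons c cs ih =>
    simp only [pvFor]; split
    · simp
    · have := ih (c :: rkey) (klen + 1); omega

theorem pvFor_snd_gt (cs rkey : List Char) (klen : Nat) (m : Int) (h : cs ≠ []) :
    klen < (pvFor cs rkey klen m).2 := by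
  rcases cs with _ | ⟨c, cs⟩
  · exact absurd rfl h
  · simp only [pvFor]; split
    · simp
    · have := pvFor_snd_ge cs (c :: rkey) (klen + 1) m; omega

-- 'while len(key) != messageLength: for i in originalKey: …', on the same
-- reversed accumulator with its length.  The guards 'orig ≠ []' and 'klen < m'
-- are totality guards only: inside Pre_ this loop is entered with a nonempty
-- originalKey and len(key) < messageLength.
def pvExt (orig : List Char) (rkey : List Char) (klen : Nat) (m : Int) : List Char :=
  if h : (klen : Int) ≠ m ∧ orig ≠ [] ∧ (klen : Int) < m then
    let p := pvFor orig rkey klen m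
    pvExt orig p.1 p.2 m
  else rkey
termination_by (m - klen).toNat
decreasing_by
  have := pvFor_snd_gt orig rkey klen m h.2.1
  omega

def prepareKey (key : String) (messageLength : Int) : String :=
  if ((key.toList.length : Int) = messageLength) then key
  else if ((key.toList.length : Int) > messageLength) then
    String.ofList (pvTrunc key.toList messageLength)
  else
    String.ofList ((pvExt key.toList key.toList.reverse key.toList.length messageLength).reverse)

-- ===== PORT B =====
-- ''.join(key[i % len(key)] for i in range(messageLength)); the '.getD ' ''
-- falls in exactly where Python would raise (len(key) = 0), which Pre_ excludes.
def prepareKey_alt (key : String) (messageLength : Int) : String :=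
  String.ofList ((PySem.List.pyRange 0 messageLength 1).map (fun i =>
    (PySem.List.pyGet? key.toList (PySem.Int.mod i (key.toList.length : Int))).getD ' '))

-- ===== PRECONDITION & SPEC =====
-- Pre_ excludes only inputs where Python A never returns (infinite loop):
-- negative messageLength, and an empty key with messageLength ≠ 0.
def Pre_prepareKey (key : String) (messageLength : Int) : Prop :=
  0 ≤ messageLength ∧ (messageLength ≠ 0 → key ≠ "")
instance (key : String) (messageLength : Int) : Decidable (Pre_prepareKey key messageLength) := by
  unfold Pre_prepareKey; infer_instance

def pvWitness_prepareKey : String × Int := ("ab", 5)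

def Spec_prepareKey (key : String) (messageLength : Int) (out : String) : Prop := out = prepareKey_alt key messageLength
instance (key : String) (messageLength : Int) (out : String) : Decidable (Spec_prepareKey key messageLength out) := by unfold Spec_prepareKey; infer_instance

-- ===== CLAIM (what is proved, stated in full; the proofs are below) =====
def Claim_equal_prepareKey : Prop := ∀ (key : String) (messageLength : Int), Dom_prepareKey key messageLength → Pre_prepareKey key messageLength → Spec_prepareKey key messageLength (prepareKey key messageLength)

-- ===== LEMMAS AND PROOFS =====

-- the cyclic pattern of length k over l
def pvCyc (l : List Char) (k : Nat) : List Char :=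
  (List.range k).map (fun j => l.getD (j % l.length) ' ')

theorem pvCyc_of_le (l : List Char) (k : Nat) (h : k ≤ l.length) :
    pvCyc l k = l.take k := by
  apply List.ext_getElem
  · simp [pvCyc]; omega
  · intro i h1 h2
    simp only [pvCyc, List.getElem_map, List.getElem_range, List.getElem_take]
    have hi : i < k := by simpa [pvCyc] using h1
    rw [Nat.mod_eq_of_lt (by omega), List.getD_eq_getElem]

theorem pvCyc_add_length (l : List Char) (k : Nat) (hl : l ≠ []) :
    pvCyc l (l.length + k) = l ++ pvCyc l k := by
  have hpos := List.length_pos_iff.mpr hl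
  apply List.ext_getElem
  · simp [pvCyc]
  · intro i h1 h2
    simp only [pvCyc, List.getElem_map, List.getElem_range]
    rcases Nat.lt_or_ge i l.length with hi | hi
    · rw [List.getElem_append_left hi, Nat.mod_eq_of_lt hi, List.getD_eq_getElem]
    · rw [List.getElem_append_right hi]
      simp only [List.getElem_map, List.getElem_range]
      rw [Nat.mod_eq_sub_mod hi]

theorem pvTrunc_eq_take (l : List Char) (M : Nat) (hM : M ≤ l.length) :
    pvTrunc l (M : Int) = l.take M := by
  unfold pvTrunc
  split
  · rename_i h
    have hne : l ≠ [] := h.2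
    have hpos := List.length_pos_iff.mpr hne
    have hlt : M < l.length := by
      rcases Nat.lt_or_ge M l.length with h' | h'
      · exact h'
      · exact absurd (by exact_mod_cast (Nat.le_antisymm hM h').symm) h.1
    simp only [Int.reduceNeg, PySem.List.slice_to_neg_one]
    rw [pvTrunc_eq_take l.dropLast M (by simp [List.length_dropLast]; omega)]
    rw [List.dropLast_eq_take, List.take_take]
    congr 1; omega
  · rename_i h
    rcases not_and_or.mp h with h1 | h1
    · have : l.length = M := by exact_mod_cast not_not.mp h1
      rw [← this, List.take_length]
    · have : l = [] := not_not.mp h1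
      subst this; simp
termination_by l.length
decreasing_by
  simp only [List.length_dropLast]
  omega

theorem pvFor_spec (M : Nat) (cs rkey : List Char) (klen : Nat) (h : klen < M) :
    pvFor cs rkey klen (M : Int) =
      ((cs.take (M - klen)).reverse ++ rkey, klen + min (M - klen) cs.length) := by
  induction cs generalizing rkey klen with
  | nil => simp [pvFor]
  | cons c cs ih =>
    simp only [pvFor]
    by_cases hb : klen + 1 = M
    · rw [if_pos (by exact_mod_cast hb)]
      rw [Prod.ext_iff]
      have h1 : M - klen = 1 := by omega
      refine ⟨?_, ?_⟩
      · simp [h1]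
      · simp only [h1, List.length_cons]
        omega
    · rw [if_neg (by intro hc; exact hb (by exact_mod_cast hc))]
      rw [ih (c :: rkey) (klen + 1) (by omega)]
      rw [Prod.ext_iff]
      have h2 : M - klen = (M - (klen + 1)) + 1 := by omega
      refine ⟨?_, ?_⟩
      · rw [h2, List.take_succ_cons, List.reverse_cons, List.append_assoc]
        rfl
      · simp only [List.length_cons]; omega

theorem pvExt_spec (M : Nat) (orig rkey : List Char) (klen : Nat) (horig : orig ≠ [])
    (hk : klen ≤ M) :
    pvExt orig rkey klen (M : Int) = (pvCyc orig (M - klen)).reverse ++ rkey := by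
  unfold pvExt
  split
  · rename_i h
    have hlt : klen < M := by exact_mod_cast h.2.2
    simp only [pvFor_spec M orig rkey klen hlt]
    by_cases hsmall : M - klen ≤ orig.length
    · have hlen : klen + min (M - klen) orig.length = M := by omega
      rw [hlen, pvExt_spec M orig _ M horig le_rfl]
      rw [Nat.sub_self, pvCyc_of_le orig _ hsmall]
      simp [pvCyc]
    · have htake : orig.take (M - klen) = orig := List.take_of_length_le (by omega)
      have hmin : min (M - klen) orig.length = orig.length := by omega
      rw [htake, hmin, pvExt_spec M orig _ (klen + orig.length) horig (by omega)]
      rw [← List.append_assoc, ← List.reverse_append]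
      congr 2
      conv_rhs => rw [show M - klen = orig.length + (M - (klen + orig.length)) from by omega]
      rw [pvCyc_add_length orig _ horig]
  · rename_i h
    have hkey : klen = M := by
      rcases not_and_or.mp h with h1 | h1
      · exact_mod_cast not_not.mp h1
      · rcases not_and_or.mp h1 with h2 | h2
        · exact absurd (not_not.mp h2) horig
        · have h3 : ¬((klen : Int) < (M : Int)) := h2
          omega
    simp [hkey, pvCyc]
termination_by (M - klen)
decreasing_by
  · omega
  · have := List.length_pos_iff.mpr horig
    omega

-- B's characters are exactly the cyclic pattern
theorem alt_eq_cyc (key : String) (M : Nat) :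
    prepareKey_alt key (M : Int) = String.ofList (pvCyc key.toList M) := by
  unfold prepareKey_alt pvCyc
  congr 1
  rw [PySem.List.pyRange_one, List.map_map]
  have hM : (((M : Int)) - 0).toNat = M := by omega
  rw [hM]
  apply List.map_congr_left
  intro j _
  simp only [Function.comp_apply, zero_add, PySem.Int.mod_natCast, PySem.List.pyGet?_natCast]
  rfl

theorem toList_ne_nil (key : String) (h : key ≠ "") : key.toList ≠ [] := by
  simpa [String.toList_eq_nil_iff] using h

-- ===== VERDICT (by name: the statement is the Claim_ definition above) =====
theorem prepareKey_spec : Claim_equal_prepareKey := by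
  intro key m _ hpre
  unfold Spec_prepareKey
  obtain ⟨hm, hne⟩ := hpre
  obtain ⟨M, rfl⟩ : ∃ M : Nat, m = (M : Int) := ⟨m.toNat, (Int.toNat_of_nonneg hm).symm⟩
  rw [alt_eq_cyc key M]
  unfold prepareKey
  by_cases h1 : (key.toList.length : Int) = (M : Int)
  · rw [if_pos h1]
    have hM : M = key.toList.length := by exact_mod_cast h1.symm
    rw [hM, pvCyc_of_le _ _ le_rfl, List.take_length]
    exact String.ofList_toList.symm
  · rw [if_neg h1]
    by_cases h2 : (key.toList.length : Int) > (M : Int)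
    · rw [if_pos h2]
      have hMle : M ≤ key.toList.length := by exact_mod_cast le_of_lt h2
      rw [pvTrunc_eq_take _ M hMle, pvCyc_of_le _ M hMle]
    · rw [if_neg h2]
      have hlt : key.toList.length < M := by omega
      have hMne : (M : Int) ≠ 0 := by
        intro hc
        have : M = 0 := by exact_mod_cast hc
        omega
      have hl : key.toList ≠ [] := toList_ne_nil key (hne hMne)
      rw [pvExt_spec M key.toList key.toList.reverse key.toList.length hl (le_of_lt hlt)]
      rw [← List.reverse_append, List.reverse_reverse]
      congr 1
      conv_rhs => rw [show M = key.toList.length + (M - key.toList.length) from by omega]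
      rw [pvCyc_add_length _ _ hl]
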